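-- pv_equiv track=rewrite | github.com/24exe/UTP | Programming_IV/Workshops/Workshop_1/5.py | maxFinder
-- ===== SOURCE A (Python) =====
-- def maxFinder(Lista : list):
--     longitud_final = 0
--     elemento_final = ""
--     for elem in Lista:
--          longitud_elemento = len(elem)
--          if longitud_elemento > longitud_final:
--             longitud_final = longitud_elemento
--             elemento_final = elem
--     return elemento_final
-- ===== SOURCE B (Python) =====
-- def maxFinder(Lista: list):
--     ordered = sorted(Lista, key=len, reverse=True)
--     return ordered[0] if ordered else ""
-- ===== Notes on version B (the rewrite author's own statement) =====
-- stated objective: alternative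
-- what changed: Replaces A's running-max scan with a stable length-descending sort followed by picking the first element (stability preserves A's first-occurrence tie-break; an empty sort yields the empty-string sentinel).
import Mathlib
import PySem

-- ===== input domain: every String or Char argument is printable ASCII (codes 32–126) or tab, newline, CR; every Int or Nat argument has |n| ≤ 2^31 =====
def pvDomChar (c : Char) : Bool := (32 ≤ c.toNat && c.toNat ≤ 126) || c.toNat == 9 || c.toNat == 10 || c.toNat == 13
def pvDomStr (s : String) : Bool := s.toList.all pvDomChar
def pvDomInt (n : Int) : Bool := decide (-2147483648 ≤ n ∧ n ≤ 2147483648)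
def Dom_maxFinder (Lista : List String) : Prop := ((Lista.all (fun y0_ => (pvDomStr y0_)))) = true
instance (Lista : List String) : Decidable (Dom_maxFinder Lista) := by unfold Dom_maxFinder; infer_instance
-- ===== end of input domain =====

-- B replaces A's running-max scan with a stable length-descending sort and takes the first element (alternative decomposition, same results).

-- ===== PORT A =====
def maxFinder (Lista : List String) : String :=
  (Lista.foldl
    (fun st elem =>
      let longitud_elemento := PySem.Str.len elem
      if longitud_elemento > st.1 then (longitud_elemento, elem) else st)
    ((0 : Int), "")).2

-- ===== PORT B =====
def maxFinder_alt (Lista : List String) : String :=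
  match PySem.List.sorted Lista (fun s => PySem.Str.len s) true with
  | [] => ""
  | x :: _ => x

-- ===== PRECONDITION & SPEC =====
def Spec_maxFinder (Lista : List String) (out : String) : Prop := out = maxFinder_alt Lista
instance (Lista : List String) (out : String) : Decidable (Spec_maxFinder Lista out) := by unfold Spec_maxFinder; infer_instance

-- ===== CLAIM (what is proved, stated in full; the proofs are below) =====
def Claim_equal_maxFinder : Prop := ∀ (Lista : List String), Dom_maxFinder Lista → Spec_maxFinder Lista (maxFinder Lista)

-- ===== LEMMAS AND PROOFS =====

-- A's loop state, read off the head of B's (descending, stable) accumulator.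
def pvHeadState (acc : List String) : Int × String :=
  match acc with
  | [] => ((0 : Int), "")
  | h :: _ => (PySem.Str.len h, h)

theorem pv_len_eq_zero {s : String} (h : PySem.Str.len s = 0) : s = "" := by
  rw [PySem.Str.len_eq] at h
  have hl : s.toList.length = 0 := by exact_mod_cast h
  have : s.toList = [] := List.eq_nil_of_length_eq_zero hl
  simpa using congrArg String.ofList this

theorem pv_step (acc : List String) (x : String) :
    pvHeadState (PySem.List.insertBy (fun a b => decide (PySem.Str.len b < PySem.Str.len a)) x acc)
      = (if PySem.Str.len x > (pvHeadState acc).1 then (PySem.Str.len x, x) else pvHeadState acc) := by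
  cases acc with
  | nil =>
    simp only [PySem.List.insertBy, pvHeadState]
    by_cases h : PySem.Str.len x > 0
    · simp
    · have h0 : PySem.Str.len x = 0 := by
        have : (0 : Int) ≤ PySem.Str.len x := by
          rw [PySem.Str.len_eq]; exact_mod_cast Nat.zero_le _
        omega
      simp [pv_len_eq_zero h0]
  | cons h t =>
    by_cases hn : h.length < x.length
    · simp [PySem.List.insertBy, pvHeadState, hn, PySem.Str.len_eq]
    · simp [PySem.List.insertBy, pvHeadState, hn, PySem.Str.len_eq]

theorem pv_invariant (xs : List String) (acc : List String) :
    xs.foldl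
      (fun st elem =>
        let longitud_elemento := PySem.Str.len elem
        if longitud_elemento > st.1 then (longitud_elemento, elem) else st)
      (pvHeadState acc)
    = pvHeadState (xs.foldl
        (fun a x => PySem.List.insertBy (fun a b => decide (PySem.Str.len b < PySem.Str.len a)) x a)
        acc) := by
  induction xs generalizing acc with
  | nil => rfl
  | cons x xs ih =>
    simp only [List.foldl_cons]
    rw [← pv_step acc x, ih]

-- ===== VERDICT (by name: the statement is the Claim_ definition above) =====
theorem maxFinder_spec : Claim_equal_maxFinder := by
  intro Lista _
  unfold Spec_maxFinder maxFinder maxFinder_alt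
  rw [PySem.List.sorted_rev_eq_foldl_insertBy]
  have h := pv_invariant Lista []
  simp only [pvHeadState] at h
  rw [h]
  cases (Lista.foldl
      (fun a x => PySem.List.insertBy (fun a b => decide (PySem.Str.len b < PySem.Str.len a)) x a)
      []) with
  | nil => rfl
  | cons h t => rfl
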